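-- pv_equiv track=rewrite | github.com/kondratyev-nv/training | python/src/number_coloring.py | number_coloring
-- ===== SOURCE A (Python) =====
-- def number_coloring(numbers):
--     if len(numbers) == 0:
--         return 0
--
--     numbers.sort()
--     if len(numbers) == 1 or numbers[0] == 1:
--         return 1
--
--     cnt = 0
--     next_start = 0
--     color = [0] * len(numbers)
--     while next_start != -1:
--         cnt += 1
--         cur_start = next_start
--         next_start = -1
--         cur = numbers[cur_start]
--         for i in range(cur_start, len(numbers)):
--             if color[i] != 0:
--                 continue
--             if numbers[i] % cur == 0:
--                 color[i] = cnt
--             elif next_start == -1: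
--                 next_start = i
--
--     return cnt
-- ===== SOURCE B (Python) =====
-- def number_coloring(numbers):
--     vals = set(numbers)
--     return sum(1 for v in vals
--                if not any(w != 0 and w < v and v % w == 0 for w in vals))
-- ===== Notes on version B (the rewrite author's own statement) =====
-- stated objective: alternative
-- what changed: A sorts in place and runs a multi-pass greedy coloring over a position-indexed color array; B drops sorting and coloring entirely and directly counts the distinct values not divisible by any smaller nonzero distinct value (one divisibility test per pair of distinct values).
import Mathlib
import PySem

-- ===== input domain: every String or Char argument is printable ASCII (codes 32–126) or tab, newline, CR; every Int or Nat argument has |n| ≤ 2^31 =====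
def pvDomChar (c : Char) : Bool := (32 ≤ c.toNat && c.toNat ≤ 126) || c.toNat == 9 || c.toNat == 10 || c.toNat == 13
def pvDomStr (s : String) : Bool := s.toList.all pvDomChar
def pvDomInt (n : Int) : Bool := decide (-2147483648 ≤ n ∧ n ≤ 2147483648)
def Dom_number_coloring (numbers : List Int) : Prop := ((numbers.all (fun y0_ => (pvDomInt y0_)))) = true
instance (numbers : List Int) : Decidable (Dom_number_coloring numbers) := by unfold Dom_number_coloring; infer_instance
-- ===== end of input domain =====

-- B replaces A's sort + multi-pass greedy coloring by a direct count of the distinct values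
-- not divisible by any smaller nonzero distinct value (objective: alternative algorithm).
-- A sorts its argument in place; the equivalence proved here is about the RETURN value only
-- (B does not mutate its argument).

-- ===== PORT A =====
-- inner 'for i in range(cur_start, len(numbers))' loop of A; state = (color, next_start)
def ncInner (s : List Int) (cur cnt : Int) (i : Nat) (color : List Int) (ns : Int) :
    List Int × Int :=
  if i < s.length then
    if color.getD i 0 ≠ 0 then ncInner s cur cnt (i + 1) color ns
    else if PySem.Int.mod (s.getD i 0) cur = 0 then
      ncInner s cur cnt (i + 1) (color.set i cnt) ns
    else if ns = -1 then ncInner s cur cnt (i + 1) color (Int.ofNat i)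
    else ncInner s cur cnt (i + 1) color ns
  else (color, ns)
termination_by s.length - i

-- outer 'while next_start != -1' loop of A; the fuel only makes the loop total
-- (next_start strictly increases, so s.length + 1 rounds always suffice)
def ncOuter (s : List Int) : Nat → Int → Int → List Int → Int
  | 0, cnt, _, _ => cnt
  | fuel + 1, cnt, ns, color =>
    if ns = -1 then cnt
    else
      let cur := s.getD ns.toNat 0
      let p := ncInner s cur (cnt + 1) ns.toNat color (-1)
      ncOuter s fuel (cnt + 1) p.2 p.1

def number_coloring (numbers : List Int) : Int :=
  if numbers.length = 0 then 0
  else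
    let s := PySem.List.sorted numbers (fun x => x) false
    if s.length = 1 ∨ s.getD 0 0 = 1 then 1
    else ncOuter s (s.length + 1) 0 0 (List.replicate s.length 0)

-- ===== PORT B =====
def number_coloring_alt (numbers : List Int) : Int :=
  let vals : PySem.Set Int := PySem.Set.ofList numbers
  Int.ofNat (vals.countP (fun v =>
    !(vals.any (fun w => decide (w ≠ 0 ∧ w < v ∧ PySem.Int.mod v w = 0)))))

-- ===== PRECONDITION & SPEC =====
-- Pre_ excludes exactly the inputs on which A raises ZeroDivisionError: lists of length ≥ 2
-- whose minimum is 0 (i.e. 0 present and every element nonnegative), where A divides by the seed 0.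
def Pre_number_coloring (numbers : List Int) : Prop :=
  numbers.length ≤ 1 ∨ ¬(0 ∈ numbers ∧ ∀ x ∈ numbers, 0 ≤ x)
instance (numbers : List Int) : Decidable (Pre_number_coloring numbers) := by
  unfold Pre_number_coloring; infer_instance

def pvWitness_number_coloring : List Int := [3, 2, 4]

def Spec_number_coloring (numbers : List Int) (out : Int) : Prop :=
  out = number_coloring_alt numbers
instance (numbers : List Int) (out : Int) : Decidable (Spec_number_coloring numbers out) := by
  unfold Spec_number_coloring; infer_instance

-- ===== CLAIM (what is proved, stated in full; the proofs are below) =====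
def Claim_equal_number_coloring : Prop := ∀ (numbers : List Int), Dom_number_coloring numbers →
  Pre_number_coloring numbers → Spec_number_coloring numbers (number_coloring numbers)

-- ===== LEMMAS AND PROOFS =====

-- the abstract round structure of A's while loop: take the first remaining value,
-- drop everything it divides, repeat
def greedy : List Int → Nat
  | [] => 0
  | c :: rest => greedy (rest.filter (fun v => decide (¬ c ∣ v))) + 1
termination_by l => l.length
decreasing_by
  simp only [List.length_unattach, List.length_cons]
  exact Nat.lt_succ_of_le (le_trans (List.length_filter_le _ _) (by simp))

-- "v needs its own color": no smaller nonzero member of T divides v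
abbrev seedProp (T : Finset Int) (v : Int) : Prop := ∀ w ∈ T, ¬(w ≠ 0 ∧ w < v ∧ w ∣ v)

def countSeeds (T : Finset Int) : Nat := (T.filter (fun v => seedProp T v)).card

-- index sets used to relate A's color array to the abstract loop
def uncolored (s color : List Int) : List Nat :=
  (List.range s.length).filter (fun j => color.getD j 0 = 0)

def uvals (s color : List Int) : List Int := (uncolored s color).map (fun j => s.getD j 0)

def colorAfter (s : List Int) (cur cnt : Int) (i : Nat) (color : List Int) : List Int :=
  color.mapIdx (fun k ck =>
    if i ≤ k ∧ ck = 0 ∧ PySem.Int.mod (s.getD k 0) cur = 0 then cnt else ck)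

def nsAfter (s : List Int) (cur : Int) (i : Nat) (color : List Int) (ns0 : Int) : Int :=
  if ns0 ≠ -1 then ns0 else
    match ((List.range s.length).filter (fun k =>
        decide (i ≤ k ∧ color.getD k 0 = 0 ∧ ¬ PySem.Int.mod (s.getD k 0) cur = 0))).head? with
    | none => -1
    | some k => (k : Int)

lemma getD_set_ne (color : List Int) (i k : Nat) (cnt : Int) (hk : k ≠ i) :
    (color.set i cnt).getD k 0 = color.getD k 0 := by
  rw [List.getD_eq_getElem?_getD, List.getD_eq_getElem?_getD, List.getElem?_set_ne (Ne.symm hk)]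

lemma colorAfter_base (s : List Int) (cur cnt : Int) (i : Nat) (color : List Int)
    (hlen : color.length = s.length) (h : ¬ i < s.length) :
    colorAfter s cur cnt i color = color := by
  unfold colorAfter
  apply List.ext_getElem (by simp)
  intro k hk1 hk2
  simp only [List.getElem_mapIdx]
  rw [if_neg]
  rintro ⟨hik, -, -⟩
  omega

lemma nsAfter_base (s : List Int) (cur : Int) (i : Nat) (color : List Int) (ns0 : Int)
    (h : ¬ i < s.length) :
    nsAfter s cur i color ns0 = ns0 := by
  unfold nsAfter
  by_cases h0 : ns0 = -1
  · rw [if_neg (by simp [h0]), List.filter_eq_nil_iff.mpr]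
    · exact h0.symm
    · intro k hk
      simp only [List.mem_range] at hk
      simp only [decide_eq_true_eq, not_and]
      intro hik
      omega
  · rw [if_pos h0]

lemma nsAfter_pos (s : List Int) (cur : Int) (i : Nat) (color : List Int) (ns0 : Int)
    (h0 : ns0 ≠ -1) :
    nsAfter s cur i color ns0 = ns0 := by
  unfold nsAfter
  rw [if_pos h0]

lemma colorAfter_succ (s : List Int) (cur cnt : Int) (i : Nat) (color : List Int)
    (h : ¬ (color.getD i 0 = 0 ∧ PySem.Int.mod (s.getD i 0) cur = 0)) :
    colorAfter s cur cnt (i + 1) color = colorAfter s cur cnt i color := by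
  unfold colorAfter
  apply List.ext_getElem (by simp)
  intro k hk1 hk2
  simp only [List.getElem_mapIdx]
  by_cases hk : k = i
  · subst hk
    have hg : color.getD k 0 = color[k]'(by simpa using hk2) := List.getD_eq_getElem color 0 (by simpa using hk2)
    rw [if_neg (by rintro ⟨hik, -, -⟩; omega), if_neg]
    rintro ⟨-, hc0, hcm⟩
    exact h ⟨hg ▸ hc0, hcm⟩
  · split_ifs with h1 h2 h3
    · rfl
    · exact absurd ⟨by omega, h1.2⟩ h2
    · exact absurd ⟨by omega, h3.2⟩ h1
    · rfl

lemma colorAfter_succ_set (s : List Int) (cur cnt : Int) (i : Nat) (color : List Int)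
    (hi : i < color.length) (h0 : color.getD i 0 = 0)
    (hm : PySem.Int.mod (s.getD i 0) cur = 0) :
    colorAfter s cur cnt (i + 1) (color.set i cnt) = colorAfter s cur cnt i color := by
  unfold colorAfter
  apply List.ext_getElem (by simp)
  intro k hk1 hk2
  simp only [List.getElem_mapIdx]
  by_cases hk : k = i
  · subst hk
    have hg : color[k]'(by simpa using hk2) = 0 := by rw [← List.getD_eq_getElem color 0 (by simpa using hk2)]; exact h0
    rw [if_neg (by rintro ⟨hik, -, -⟩; omega), if_pos ⟨le_refl _, hg, hm⟩]
    exact List.getElem_set_self _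
  · have hset : (color.set i cnt)[k]'(by simpa using hk1) = color[k]'(by simpa using hk2) :=
      List.getElem_set_ne (fun hh => hk (hh.symm)) _
    rw [hset]
    split_ifs with h1 h2 h3
    · rfl
    · exact absurd ⟨by omega, h1.2⟩ h2
    · exact absurd ⟨by omega, h3.2⟩ h1
    · rfl

lemma nsAfter_succ (s : List Int) (cur : Int) (i : Nat) (color color' : List Int) (ns0 : Int)
    (h : ¬ (color.getD i 0 = 0 ∧ ¬ PySem.Int.mod (s.getD i 0) cur = 0))
    (hc : ∀ k, k ≠ i → color'.getD k 0 = color.getD k 0) :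
    nsAfter s cur (i + 1) color' ns0 = nsAfter s cur i color ns0 := by
  unfold nsAfter
  by_cases h0 : ns0 ≠ -1
  · rw [if_pos h0, if_pos h0]
  · rw [if_neg h0, if_neg h0]
    have hfe : (List.range s.length).filter (fun k =>
        decide (i + 1 ≤ k ∧ color'.getD k 0 = 0 ∧ ¬ PySem.Int.mod (s.getD k 0) cur = 0)) =
        (List.range s.length).filter (fun k =>
        decide (i ≤ k ∧ color.getD k 0 = 0 ∧ ¬ PySem.Int.mod (s.getD k 0) cur = 0)) := by
      apply List.filter_congr
      intro k _
      simp only [decide_eq_decide]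
      by_cases hk : k = i
      · subst hk
        constructor
        · rintro ⟨hik, -, -⟩; omega
        · rintro ⟨-, hc0, hcm⟩; exact absurd ⟨hc0, hcm⟩ h
      · rw [hc k hk]
        constructor
        · rintro ⟨hik, hrest⟩; exact ⟨by omega, hrest⟩
        · rintro ⟨hik, hrest⟩; exact ⟨by omega, hrest⟩
    rw [hfe]

lemma nsAfter_found (s : List Int) (cur : Int) (i : Nat) (color : List Int)
    (hi : i < s.length) (h0 : color.getD i 0 = 0)
    (hm : ¬ PySem.Int.mod (s.getD i 0) cur = 0) :
    nsAfter s cur i color (-1) = Int.ofNat i := by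
  unfold nsAfter
  rw [if_neg (by simp)]
  obtain ⟨m, hsm⟩ : ∃ m, s.length = i + (m + 1) := ⟨s.length - i - 1, by omega⟩
  rw [hsm, List.range_add, List.filter_append]
  rw [List.filter_eq_nil_iff.mpr (by
    intro k hk
    simp only [List.mem_range] at hk
    simp only [decide_eq_true_eq, not_and]
    intro hik
    omega), List.nil_append]
  rw [List.range_succ_eq_map, List.map_cons, Nat.add_zero,
    List.filter_cons_of_pos (by simp only [decide_eq_true_eq]; exact ⟨le_refl _, h0, hm⟩)]
  rfl

lemma ncInner_eq (s : List Int) (cur cnt : Int) (i : Nat) (color : List Int) (ns0 : Int)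
    (hlen : color.length = s.length) :
    ncInner s cur cnt i color ns0 =
      (colorAfter s cur cnt i color, nsAfter s cur i color ns0) := by
  rw [ncInner]
  by_cases hi : i < s.length
  · rw [if_pos hi]
    by_cases h1 : color.getD i 0 ≠ 0
    · rw [if_pos h1, ncInner_eq s cur cnt (i + 1) color ns0 hlen,
        colorAfter_succ s cur cnt i color (by tauto),
        nsAfter_succ s cur i color color ns0 (by tauto) (fun _ _ => rfl)]
    · have h0 : color.getD i 0 = 0 := not_ne_iff.mp h1
      rw [if_neg h1]
      by_cases h2 : PySem.Int.mod (s.getD i 0) cur = 0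
      · rw [if_pos h2, ncInner_eq s cur cnt (i + 1) (color.set i cnt) ns0 (by simp [hlen]),
          colorAfter_succ_set s cur cnt i color (by omega) h0 h2,
          nsAfter_succ s cur i color (color.set i cnt) ns0 (by tauto)
            (fun k hk => getD_set_ne color i k cnt hk)]
      · rw [if_neg h2]
        by_cases h3 : ns0 = -1
        · rw [if_pos h3, ncInner_eq s cur cnt (i + 1) color (Int.ofNat i) hlen,
            colorAfter_succ s cur cnt i color (by tauto),
            nsAfter_pos s cur (i + 1) color (Int.ofNat i) (by intro hh; have h4 : (0:Int) ≤ Int.ofNat i := Int.natCast_nonneg i; omega),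
            h3, nsAfter_found s cur i color hi h0 h2]
        · rw [if_neg h3, ncInner_eq s cur cnt (i + 1) color ns0 hlen,
            colorAfter_succ s cur cnt i color (by tauto),
            nsAfter_pos s cur (i + 1) color ns0 h3,
            nsAfter_pos s cur i color ns0 h3]
  · rw [if_neg hi, colorAfter_base s cur cnt i color hlen hi,
      nsAfter_base s cur i color ns0 hi]
termination_by s.length - i
decreasing_by all_goals omega

lemma ncOuter_eq (s : List Int) (fuel : Nat) (cnt : Int) (ns : Int) (color : List Int)
    (hlen : color.length = s.length) (hcnt : 0 ≤ cnt)
    (hfuel : (uncolored s color).length < fuel)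
    (hns : ns = (match (uncolored s color).head? with | none => -1 | some j => (j : Int))) :
    ncOuter s fuel cnt ns color = cnt + (greedy (uvals s color) : Int) := by
  match fuel with
  | 0 => exact absurd hfuel (by omega)
  | fuel + 1 =>
    rw [ncOuter]
    cases hu : uncolored s color with
    | nil =>
      rw [hu] at hns
      simp only [List.head?_nil] at hns
      rw [if_pos hns, show uvals s color = [] by rw [uvals, hu]; rfl]
      simp [greedy]
    | cons j tl =>
      rw [hu] at hns
      simp only [List.head?_cons] at hns
      have hns' : ns = (j : Int) := hns
      have hjmem : j ∈ uncolored s color := by rw [hu]; exact List.mem_cons_self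
      have hj : j < s.length ∧ color.getD j 0 = 0 := by
        have := List.mem_filter.mp hjmem
        simpa [List.mem_range] using this
      have hpair : (uncolored s color).Pairwise (· < ·) :=
        List.Pairwise.filter _ List.pairwise_lt_range
      have hmin : ∀ k ∈ uncolored s color, j ≤ k := by
        intro k hk
        rw [hu] at hk hpair
        rcases List.mem_cons.mp hk with rfl | hk
        · exact le_refl k
        · exact le_of_lt ((List.pairwise_cons.mp hpair).1 k hk)
      have hlow : ∀ k, k < j → k < s.length → color.getD k 0 ≠ 0 := by
        intro k hkj hks hc0
        have hkm : k ∈ uncolored s color := by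
          unfold uncolored
          rw [List.mem_filter]
          exact ⟨List.mem_range.mpr hks, by rw [decide_eq_true_eq]; exact hc0⟩
        exact absurd (hmin k hkm) (by omega)
      rw [if_neg (by rw [hns']; intro hh; have h4 : (0:Int) ≤ (j:Int) := Int.natCast_nonneg j; omega)]
      have htn : ns.toNat = j := by rw [hns']; exact Int.toNat_natCast j
      rw [htn]
      simp only [ncInner_eq s (s.getD j 0) (cnt + 1) j color (-1) hlen]
      have hU : uncolored s (colorAfter s (s.getD j 0) (cnt + 1) j color) =
          (List.range s.length).filter (fun k =>
            decide (j ≤ k ∧ color.getD k 0 = 0 ∧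
              ¬ PySem.Int.mod (s.getD k 0) (s.getD j 0) = 0)) := by
        unfold uncolored
        apply List.filter_congr
        intro k hk
        have hks : k < s.length := List.mem_range.mp hk
        rw [decide_eq_decide]
        have hgd : (colorAfter s (s.getD j 0) (cnt + 1) j color).getD k 0 =
            if j ≤ k ∧ color[k]'(by omega) = 0 ∧
              PySem.Int.mod (s.getD k 0) (s.getD j 0) = 0 then cnt + 1
            else color[k]'(by omega) := by
          unfold colorAfter
          rw [List.getD_eq_getElem _ 0 (by simp; omega), List.getElem_mapIdx]
        have hge : color.getD k 0 = color[k]'(by omega) := List.getD_eq_getElem color 0 (by omega)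
        rw [hgd, hge]
        by_cases hcond : j ≤ k ∧ color[k]'(by omega) = 0 ∧
            PySem.Int.mod (s.getD k 0) (s.getD j 0) = 0
        · rw [if_pos hcond]
          constructor
          · intro hh; omega
          · rintro ⟨-, -, hmm⟩; exact absurd hcond.2.2 hmm
        · rw [if_neg hcond]
          constructor
          · intro hc0
            have hjk : j ≤ k := by
              by_contra hn
              exact hlow k (by omega) hks (by rw [hge]; exact hc0)
            exact ⟨hjk, hc0, fun hmm => hcond ⟨hjk, hc0, hmm⟩⟩
          · rintro ⟨-, hc0, -⟩; exact hc0
      have hF : (List.range s.length).filter (fun k =>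
            decide (j ≤ k ∧ color.getD k 0 = 0 ∧
              ¬ PySem.Int.mod (s.getD k 0) (s.getD j 0) = 0)) =
          (uncolored s color).filter (fun k =>
            decide (¬ PySem.Int.mod (s.getD k 0) (s.getD j 0) = 0)) := by
        unfold uncolored
        rw [List.filter_filter]
        apply List.filter_congr
        intro k hk
        have hks : k < s.length := List.mem_range.mp hk
        rw [← Bool.decide_and, decide_eq_decide]
        constructor
        · rintro ⟨-, hc0, hmm⟩; exact ⟨hmm, hc0⟩
        · rintro ⟨hmm, hc0⟩
          have hjk : j ≤ k := by
            by_contra hn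
            exact hlow k (by omega) hks hc0
          exact ⟨hjk, hc0, hmm⟩
      have hpj : ¬ ((decide (¬ PySem.Int.mod (s.getD j 0) (s.getD j 0) = 0)) = true) := by
        simp only [decide_eq_true_eq, not_not]
        exact (PySem.Int.mod_eq_zero_iff_dvd _ _).mpr (dvd_refl _)
      have hU2 : uncolored s (colorAfter s (s.getD j 0) (cnt + 1) j color) =
          tl.filter (fun k => decide (¬ PySem.Int.mod (s.getD k 0) (s.getD j 0) = 0)) := by
        rw [hU, hF, hu, List.filter_cons_of_neg (by exact hpj)]
      have hN : nsAfter s (s.getD j 0) j color (-1) =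
          (match (uncolored s (colorAfter s (s.getD j 0) (cnt + 1) j color)).head? with
            | none => -1 | some k => (k : Int)) := by
        rw [hU, hF, hu, List.filter_cons_of_neg (by exact hpj)]
        unfold nsAfter
        rw [if_neg (by omega), hF, hu, List.filter_cons_of_neg (by exact hpj)]
      have hlen' : (colorAfter s (s.getD j 0) (cnt + 1) j color).length = s.length := by
        unfold colorAfter; rw [List.length_mapIdx]; exact hlen
      have hfsz : (uncolored s (colorAfter s (s.getD j 0) (cnt + 1) j color)).length < fuel := by
        rw [hU2]
        have h5 := List.length_filter_le
          (fun k => decide (¬ PySem.Int.mod (s.getD k 0) (s.getD j 0) = 0)) tl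
        have h6 : (uncolored s color).length = tl.length + 1 := by rw [hu]; rfl
        omega
      rw [ncOuter_eq s fuel (cnt + 1)
        (nsAfter s (s.getD j 0) j color (-1))
        (colorAfter s (s.getD j 0) (cnt + 1) j color) hlen' (by omega) hfsz hN]
      have hv1 : uvals s color = s.getD j 0 :: tl.map (fun k => s.getD k 0) := by
        unfold uvals; rw [hu]; rfl
      have hv2 : uvals s (colorAfter s (s.getD j 0) (cnt + 1) j color) =
          (tl.map (fun k => s.getD k 0)).filter (fun v => decide (¬ (s.getD j 0) ∣ v)) := by
        unfold uvals
        rw [hU2, List.filter_map]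
        congr 1
        apply List.filter_congr
        intro k _
        simp only [Function.comp_apply, decide_eq_decide]
        rw [PySem.Int.mod_eq_zero_iff_dvd]
      rw [hv1, hv2, greedy]
      push_cast
      ring
termination_by fuel

lemma greedy_eq_countSeeds (L : List Int) (hs : L.Pairwise (· ≤ ·))
    (hhd : ∀ h : L ≠ [], L.head h ≠ 0) :
    greedy L = countSeeds L.toFinset := by
  match L with
  | [] => simp [greedy, countSeeds]
  | c :: rest =>
    have hc : c ≠ 0 := hhd (by simp)
    have hpc := List.pairwise_cons.mp hs
    have hmin : ∀ v ∈ c :: rest, c ≤ v := by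
      intro v hv
      rcases List.mem_cons.mp hv with h | h
      · exact h ▸ le_refl c
      · exact hpc.1 v h
    have hs' : (rest.filter (fun v => decide (¬ c ∣ v))).Pairwise (· ≤ ·) :=
      List.Pairwise.filter _ hpc.2
    have hhd' : ∀ h : (rest.filter (fun v => decide (¬ c ∣ v))) ≠ [],
        (rest.filter (fun v => decide (¬ c ∣ v))).head h ≠ 0 := by
      intro h h0
      have hm := List.head_mem h
      rw [h0] at hm
      simpa using (List.mem_filter.mp hm).2
    have IH := greedy_eq_countSeeds (rest.filter (fun v => decide (¬ c ∣ v))) hs' hhd'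
    rw [greedy, IH]
    -- set-level bookkeeping
    have hmemT' : ∀ v : Int, v ∈ (rest.filter (fun v => decide (¬ c ∣ v))).toFinset ↔
        v ∈ (c :: rest).toFinset ∧ ¬ c ∣ v := by
      intro v
      simp only [List.mem_toFinset, List.mem_filter, List.mem_cons, decide_eq_true_eq]
      constructor
      · rintro ⟨hv, hnd⟩; exact ⟨Or.inr hv, hnd⟩
      · rintro ⟨hv | hv, hnd⟩
        · exact absurd (hv ▸ dvd_refl c) hnd
        · exact ⟨hv, hnd⟩
    have hseed_iff : ∀ v ∈ (rest.filter (fun v => decide (¬ c ∣ v))).toFinset,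
        (seedProp (rest.filter (fun v => decide (¬ c ∣ v))).toFinset v ↔
         seedProp (c :: rest).toFinset v) := by
      intro v hv
      constructor
      · intro hsd w hw hbad
        obtain ⟨hw0, hwv, hdvd⟩ := hbad
        by_cases hcw : c ∣ w
        · exact ((hmemT' v).mp hv).2 (dvd_trans hcw hdvd)
        · exact hsd w ((hmemT' w).mpr ⟨hw, hcw⟩) ⟨hw0, hwv, hdvd⟩
      · intro hsd w hw hbad
        exact hsd w ((hmemT' w).mp hw).1 hbad
    have hseedc : seedProp (c :: rest).toFinset c := by
      intro w hw hbad
      exact absurd hbad.2.1 (not_lt.mpr (hmin w (List.mem_toFinset.mp hw)))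
    have hsplit : ((c :: rest).toFinset.filter (fun v => seedProp (c :: rest).toFinset v)) =
        insert c ((rest.filter (fun v => decide (¬ c ∣ v))).toFinset.filter
          (fun v => seedProp (rest.filter (fun v => decide (¬ c ∣ v))).toFinset v)) := by
      apply Finset.ext
      intro v
      simp only [Finset.mem_filter, Finset.mem_insert]
      constructor
      · rintro ⟨hvT, hsd⟩
        by_cases hvc : v = c
        · exact Or.inl hvc
        · have hcv : ¬ c ∣ v := by
            intro hdvd
            have hlt : c < v := lt_of_le_of_ne (hmin v (List.mem_toFinset.mp hvT)) (Ne.symm hvc)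
            exact hsd c (by simp) ⟨hc, hlt, hdvd⟩
          have hvT' := (hmemT' v).mpr ⟨hvT, hcv⟩
          exact Or.inr ⟨hvT', ((hseed_iff v hvT').mpr hsd)⟩
      · rintro (rfl | ⟨hvT', hsd⟩)
        · exact ⟨by simp, hseedc⟩
        · exact ⟨((hmemT' v).mp hvT').1, (hseed_iff v hvT').mp hsd⟩
    have hcnot : c ∉ ((rest.filter (fun v => decide (¬ c ∣ v))).toFinset.filter
        (fun v => seedProp (rest.filter (fun v => decide (¬ c ∣ v))).toFinset v)) := by
      intro hmm
      exact ((hmemT' c).mp (Finset.mem_filter.mp hmm).1).2 (dvd_refl c)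
    unfold countSeeds
    rw [hsplit, Finset.card_insert_of_notMem hcnot]
termination_by L.length
decreasing_by
  exact Nat.lt_succ_of_le (List.length_filter_le _ rest)

lemma alt_eq_countSeeds (numbers : List Int) :
    number_coloring_alt numbers = (countSeeds numbers.toFinset : Int) := by
  have hnd : List.Nodup (PySem.Set.ofList numbers) := PySem.Set.nodup_ofList numbers
  have hmem : ∀ w : Int, w ∈ PySem.Set.ofList numbers ↔ w ∈ numbers := fun w =>
    PySem.Set.mem_ofList numbers w
  show Int.ofNat (List.countP _ (PySem.Set.ofList numbers)) = _
  unfold countSeeds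
  rw [List.countP_eq_length_filter, ← List.toFinset_card_of_nodup (List.Nodup.filter _ hnd),
    List.toFinset_filter]
  have hT : (PySem.Set.ofList numbers).toFinset = numbers.toFinset := by
    apply Finset.ext; intro v; simp only [List.mem_toFinset, hmem]
  rw [hT]
  have hpred : ∀ v ∈ numbers.toFinset,
      ((!((PySem.Set.ofList numbers : List Int).any (fun w =>
          decide (w ≠ 0 ∧ w < v ∧ PySem.Int.mod v w = 0)))) = true) ↔
      seedProp numbers.toFinset v := by
    intro v _
    simp only [Bool.not_eq_true', List.any_eq_false, decide_eq_true_eq, seedProp,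
      List.mem_toFinset, hmem, PySem.Int.mod_eq_zero_iff_dvd]
  rw [Finset.filter_congr hpred]
  simp

lemma countSeeds_singleton (x : Int) : countSeeds {x} = 1 := by
  unfold countSeeds
  rw [Finset.filter_singleton, if_pos]
  · exact Finset.card_singleton x
  · intro w hw hbad
    rw [Finset.mem_singleton] at hw
    subst hw
    exact absurd hbad.2.1 (lt_irrefl w)

lemma countSeeds_min_one (T : Finset Int) (h1 : (1 : Int) ∈ T)
    (hmin : ∀ v ∈ T, 1 ≤ v) : countSeeds T = 1 := by
  unfold countSeeds
  have hset : T.filter (fun v => seedProp T v) = {1} := by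
    apply Finset.ext
    intro v
    rw [Finset.mem_filter, Finset.mem_singleton]
    constructor
    · rintro ⟨hv, hs⟩
      by_contra hne
      exact hs 1 h1 ⟨one_ne_zero, lt_of_le_of_ne (hmin v hv) (Ne.symm hne), one_dvd v⟩
    · rintro rfl
      refine ⟨h1, ?_⟩
      intro w hw hbad
      exact absurd hbad.2.1 (not_lt.mpr (hmin w hw))
  rw [hset]
  exact Finset.card_singleton 1

lemma uncolored_replicate (s : List Int) :
    uncolored s (List.replicate s.length 0) = List.range s.length := by
  unfold uncolored
  apply List.filter_eq_self.mpr
  intro k hk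
  rw [decide_eq_true_eq, List.getD_eq_getElem _ 0
    (by simpa using List.mem_range.mp hk), List.getElem_replicate]

lemma uvals_replicate (s : List Int) : uvals s (List.replicate s.length 0) = s := by
  unfold uvals
  rw [uncolored_replicate]
  apply List.ext_getElem (by simp)
  intro k hk1 hk2
  simp only [List.getElem_map, List.getElem_range]
  exact List.getD_eq_getElem s 0 hk2

lemma number_coloring_eq_body (numbers : List Int) (h0 : ¬ numbers.length = 0) :
    number_coloring numbers =
      (if (PySem.List.sorted numbers (fun x => x) false).length = 1 ∨
          (PySem.List.sorted numbers (fun x => x) false).getD 0 0 = 1 then 1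
       else ncOuter (PySem.List.sorted numbers (fun x => x) false)
         ((PySem.List.sorted numbers (fun x => x) false).length + 1) 0 0
         (List.replicate (PySem.List.sorted numbers (fun x => x) false).length 0)) := by
  unfold number_coloring
  rw [if_neg h0]

-- ===== VERDICT (by name: the statement is the Claim_ definition above) =====
theorem number_coloring_spec : Claim_equal_number_coloring := by
  intro numbers _ hpre
  unfold Spec_number_coloring
  rw [alt_eq_countSeeds]
  by_cases h0 : numbers.length = 0
  · obtain rfl : numbers = [] := List.length_eq_zero_iff.mp h0
    simp [number_coloring, countSeeds]
  · rw [number_coloring_eq_body numbers h0]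
    have hperm := PySem.List.sorted_perm numbers (fun x => x) false
    have hpw : (PySem.List.sorted numbers (fun x => x) false).Pairwise (· ≤ ·) := by
      simpa using PySem.List.sorted_pairwise numbers (fun x => x)
    obtain ⟨c, t, hseq⟩ : ∃ c t, PySem.List.sorted numbers (fun x => x) false = c :: t := by
      cases hs : PySem.List.sorted numbers (fun x => x) false with
      | nil =>
        rw [hs] at hperm
        have hl := hperm.length_eq
        simp only [List.length_nil] at hl
        exact absurd hl.symm h0
      | cons a b => exact ⟨a, b, rfl⟩
    rw [hseq] at hperm hpw ⊢
    have hlens : (c :: t).length = numbers.length := hperm.length_eq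
    have hTs : (c :: t).toFinset = numbers.toFinset := List.toFinset_eq_of_perm _ _ hperm
    have hmins : ∀ v ∈ c :: t, c ≤ v := by
      intro v hv
      rcases List.mem_cons.mp hv with rfl | hv
      · exact le_refl v
      · exact (List.pairwise_cons.mp hpw).1 v hv
    by_cases hguard : (c :: t).length = 1 ∨ (c :: t).getD 0 0 = 1
    · rw [if_pos hguard]
      rcases hguard with hg | hg
      · have h1 : numbers.length = 1 := by omega
        obtain ⟨x, rfl⟩ : ∃ x, numbers = [x] := by
          cases numbers with
          | nil => exact absurd rfl h0
          | cons a b =>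
            cases b with
            | nil => exact ⟨a, rfl⟩
            | cons a' b' => simp at h1
        rw [show ([x] : List Int).toFinset = {x} by simp, countSeeds_singleton x]
        norm_num
      · have hc1 : c = 1 := by simpa using hg
        subst hc1
        have h1T : (1 : Int) ∈ numbers.toFinset := by
          rw [← hTs]; simp
        have hminT : ∀ v ∈ numbers.toFinset, (1 : Int) ≤ v := by
          intro v hv
          have hvs : v ∈ (1 : Int) :: t := by
            rw [List.mem_toFinset] at hv
            exact hperm.mem_iff.mpr hv
          exact hmins v hvs
        rw [countSeeds_min_one numbers.toFinset h1T hminT]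
        norm_num
    · rw [if_neg hguard]
      rw [ncOuter_eq (c :: t) ((c :: t).length + 1) 0 0 (List.replicate (c :: t).length 0)
        (by simp) (le_refl 0)
        (by rw [uncolored_replicate]; simp)
        (by rw [uncolored_replicate]
            have : (c :: t).length = (t.length) + 1 := rfl
            rw [this, List.range_succ_eq_map]
            rfl)]
      rw [uvals_replicate]
      have hhd : ∀ h : (c :: t) ≠ [], (c :: t).head h ≠ 0 := by
        intro _ hc0
        simp only [List.head_cons] at hc0
        subst hc0
        have hmem0 : (0 : Int) ∈ numbers := hperm.mem_iff.mp List.mem_cons_self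
        have hnn : ∀ x ∈ numbers, (0 : Int) ≤ x := by
          intro x hx
          exact hmins x (hperm.mem_iff.mpr hx)
        rcases hpre with hp | hp
        · have hll := hlens
          have hne1 : ¬ ((0 : Int) :: t).length = 1 := fun hh => hguard (Or.inl hh)
          simp only [List.length_cons] at hll hne1
          omega
        · exact hp ⟨hmem0, hnn⟩
      rw [greedy_eq_countSeeds (c :: t) hpw hhd, hTs]
      ring
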